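-- pv_equiv track=rewrite | github.com/MikulasIbl/Doors | Nová složka/doorsFaster.py | allStarts
-- ===== SOURCE A (Python) =====
-- def firstChar(text):
--     return text[0]
--
-- def allStarts(words):
--     start = {}
--     for word in words:
--         char = firstChar(word)
--         if char in start.keys():
--             start[char] = start[char]+1
--         else:
--             start[char] = 1
--     return start
-- ===== SOURCE B (Python) =====
-- def allStarts(words):
--     firsts = [w[0] for w in words]
--     return {c: firsts.count(c) for c in dict.fromkeys(firsts)}
-- ===== Notes on version B (the rewrite author's own statement) =====
-- stated objective: alternative
-- what changed: Replaces the incremental per-word dict update with a two-phase scheme: extract all first characters, deduplicate them in first-occurrence order, then count each key's occurrences directly.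
import Mathlib
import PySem

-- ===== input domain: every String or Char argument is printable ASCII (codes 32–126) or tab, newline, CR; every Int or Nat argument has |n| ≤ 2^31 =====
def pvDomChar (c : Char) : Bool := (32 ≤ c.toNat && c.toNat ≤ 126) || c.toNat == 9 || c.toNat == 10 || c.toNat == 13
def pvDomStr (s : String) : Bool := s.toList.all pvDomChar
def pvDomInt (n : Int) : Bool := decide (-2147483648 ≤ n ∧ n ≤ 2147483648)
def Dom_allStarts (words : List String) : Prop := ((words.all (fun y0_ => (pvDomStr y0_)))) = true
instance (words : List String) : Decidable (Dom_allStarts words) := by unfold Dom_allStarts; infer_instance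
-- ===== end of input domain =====

-- B is an alternative two-phase scheme (collect first chars, dedup in first-occurrence
-- order, count each key) instead of A's incremental per-word dict update; equal values proved.

-- Python's text[0]: a one-character string; none (IndexError on "") is excluded by Pre_.
def firstChar (text : String) : String :=
  match PySem.Str.pyGet? text 0 with
  | some c => String.ofList [c]
  | none => ""

-- ===== PORT A =====
def allStarts (words : List String) : List (String × Int) :=
  (words.foldl (fun start word =>
      let char := firstChar word
      if start.contains char then start.insert char (start.getD char 0 + 1)
      else start.insert char 1)
    PySem.Dict.empty).items

-- ===== PORT B =====
def allStarts_alt (words : List String) : List (String × Int) :=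
  let firsts := words.map firstChar
  (PySem.List.dedup firsts).map (fun c => (c, (firsts.count c : Int)))

-- ===== PRECONDITION & SPEC =====
-- A raises IndexError (text[0] on "") whenever some word is empty; exactly those inputs are excluded.
def Pre_allStarts (words : List String) : Prop := ∀ w ∈ words, w ≠ ""
instance (words : List String) : Decidable (Pre_allStarts words) := by unfold Pre_allStarts; infer_instance
def pvWitness_allStarts : List String := ["apple", "ant", "bee"]

def Spec_allStarts (words : List String) (out : List (String × Int)) : Prop := out = allStarts_alt words
instance (words : List String) (out : List (String × Int)) : Decidable (Spec_allStarts words out) := by unfold Spec_allStarts; infer_instance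

-- ===== CLAIM (what is proved, stated in full; the proofs are below) =====
def Claim_equal_allStarts : Prop := ∀ (words : List String), Dom_allStarts words → Pre_allStarts words → Spec_allStarts words (allStarts words)

-- ===== LEMMAS AND PROOFS =====

-- A's loop body, on one key: both branches are the same insert with getD-plus-one.
theorem allStarts_body_eq (d : PySem.Dict String Int) (c : String) :
    (if d.contains c then d.insert c (d.getD c 0 + 1) else d.insert c 1)
      = d.insert c (d.getD c 0 + 1) := by
  by_cases h : d.contains c = true
  · simp [h]
  · simp only [Bool.not_eq_true] at h
    simp [h, PySem.Dict.getD_of_not_contains d 0 h]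

-- ===== VERDICT (by name: the statement is the Claim_ definition above) =====
theorem allStarts_spec : Claim_equal_allStarts := by
  intro words _ _
  show allStarts words = allStarts_alt words
  simp only [allStarts, allStarts_alt]
  have hf : (fun (start : PySem.Dict String Int) word =>
      let char := firstChar word
      if start.contains char then start.insert char (start.getD char 0 + 1)
      else start.insert char 1)
      = (fun (d : PySem.Dict String Int) w => d.insert (firstChar w) (d.getD (firstChar w) 0 + 1)) := by
    funext d w
    exact allStarts_body_eq d (firstChar w)
  have h2 : words.foldl (fun (d : PySem.Dict String Int) w =>
      d.insert (firstChar w) (d.getD (firstChar w) 0 + 1)) PySem.Dict.empty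
      = (words.map firstChar).foldl (fun d x => d.insert x (d.getD x 0 + 1)) PySem.Dict.empty :=
    (List.foldl_map (f := firstChar) (g := fun (d : PySem.Dict String Int) (x : String) => d.insert x (d.getD x 0 + 1))).symm
  rw [hf, h2, PySem.Dict.foldl_insert_getD_add_one_eq_counter, PySem.Dict.items_counter]
  rfl
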